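-- pv_equiv track=rewrite | github.com/PaddlePaddle/Paddle | python/paddle/fluid/tests/unittests/test_tree_conv_op.py | collect_node_patch
-- ===== SOURCE A (Python) =====
-- def collect_node_patch(og, max_depth):
--     """
--     The naive method to construct patches
--     :param og: original graph
--     :param max_depth: the depth of convolution filters
--     :return: convolution patches
--     """
--
--     def gen(node, max_depth):
--         collected = [(node, 1, 1, 0, max_depth)]
--
--         def recurse_helper(node, depth):
--             if depth > max_depth:
--                 return
--             l = len(og[node])
--             for idx, c in enumerate(og[node], 1):
--                 if depth + 1 < max_depth:
--                     collected.append((c, idx, l, depth + 1, max_depth))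
--                     recurse_helper(c, depth + 1)
--
--         recurse_helper(node, 0)
--         return collected
--
--     res = []
--     for u in range(1, len(og)):
--         lis = gen(u, max_depth)
--         if len(lis) > 0:
--             res.append(lis)
--     return res
-- ===== SOURCE B (Python) =====
-- def collect_node_patch(og, max_depth):
--     """Bottom-up DP: build per-depth tables of subtree patch lists shared by all roots."""
--     n = len(og)
--     T = [[] for _ in range(n)]
--     for d in range(max_depth - 2, -1, -1):
--         nd = d + 1
--         newT = []
--         for children in og:
--             l = len(children)
--             row = []
--             for idx, c in enumerate(children, 1):
--                 row.append((c, idx, l, nd, max_depth))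
--                 row.extend(T[c])
--             newT.append(row)
--         T = newT
--     return [[(u, 1, 1, 0, max_depth)] + T[u] for u in range(1, n)]
-- ===== Notes on version B (the rewrite author's own statement) =====
-- stated objective: alternative
-- what changed: Replaces the per-root recursive DFS with a bottom-up dynamic program: one table of subtree patch lists per depth layer, computed once for all nodes and shared by every root, so repeated subtrees are expanded only once per layer instead of once per occurrence.
-- outside the precondition, e.g. on collect_node_patch([[5], []], 2): A returns [[(1, 1, 1, 0, 2)]], B raises IndexError
import Mathlib
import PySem

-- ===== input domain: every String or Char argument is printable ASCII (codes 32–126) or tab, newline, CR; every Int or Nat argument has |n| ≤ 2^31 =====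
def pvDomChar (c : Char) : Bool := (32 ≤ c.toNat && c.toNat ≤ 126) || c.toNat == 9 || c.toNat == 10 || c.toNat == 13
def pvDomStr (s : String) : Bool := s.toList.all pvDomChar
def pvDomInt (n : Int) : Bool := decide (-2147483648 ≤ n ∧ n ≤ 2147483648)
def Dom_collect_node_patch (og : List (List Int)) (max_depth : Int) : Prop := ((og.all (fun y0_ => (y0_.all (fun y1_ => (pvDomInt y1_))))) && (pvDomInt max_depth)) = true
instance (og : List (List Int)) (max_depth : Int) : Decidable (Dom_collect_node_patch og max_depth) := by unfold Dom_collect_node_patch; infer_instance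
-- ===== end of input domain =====

-- B replaces the per-root recursive DFS with a bottom-up DP over depth layers whose
-- subtree patch lists are shared by all roots (alternative decomposition, same results).

-- ===== PORT A =====
-- recurse_helper: appending to `collected` is modelled as returning the list of emitted
-- tuples; the Nat fuel only bounds the recursion depth (the Python recursion depth is
-- at most max_depth, so fuel max_depth.toNat + 1 is never exhausted).
def pvRecA (og : List (List Int)) (md : Int) : Nat → Int → Int → List (Int × Int × Int × Int × Int)
  | 0, _, _ => []
  | (f+1), node, depth =>
    if depth > md then []
    else
      let ch := (PySem.List.pyGet? og node).getD []   -- og[node]; Pre_ guarantees some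
      let l : Int := (ch.length : Int)
      (PySem.List.enumerate ch 1).flatMap (fun ic =>
        if depth + 1 < md then (ic.2, ic.1, l, depth + 1, md) :: pvRecA og md f ic.2 (depth + 1)
        else [])

def collect_node_patch (og : List (List Int)) (max_depth : Int) : List (List (Int × Int × Int × Int × Int)) :=
  (PySem.List.pyRange 1 (og.length : Int) 1).foldl (fun res u =>
    let lis := (u, 1, 1, 0, max_depth) :: pvRecA og max_depth (max_depth.toNat + 1) u 0
    if lis.length > 0 then res ++ [lis] else res) []

-- ===== PORT B =====
-- one row of the depth-layer table: patches contributed below a node whose child list is ch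
def pvRowB (md nd : Int) (T : List (List (Int × Int × Int × Int × Int))) (ch : List Int) :
    List (Int × Int × Int × Int × Int) :=
  let l : Int := (ch.length : Int)
  (PySem.List.enumerate ch 1).flatMap (fun ic =>
    (ic.2, ic.1, l, nd, md) :: (PySem.List.pyGet? T ic.2).getD [])   -- T[c]; Pre_ guarantees some

def collect_node_patch_alt (og : List (List Int)) (max_depth : Int) : List (List (Int × Int × Int × Int × Int)) :=
  let T0 := og.map (fun _ => ([] : List (Int × Int × Int × Int × Int)))
  let T := (PySem.List.pyRange (max_depth - 2) (-1) (-1)).foldl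
    (fun T d => og.map (pvRowB max_depth (d + 1) T)) T0
  (PySem.List.pyRange 1 (og.length : Int) 1).map
    (fun u => (u, 1, 1, 0, max_depth) :: (PySem.List.pyGet? T u).getD [])

-- ===== PRECONDITION & SPEC =====
-- Pre_ excludes inputs on which A's DFS dereferences og[c] for an out-of-range child c
-- (IndexError). It also excludes some inputs on which A still returns — an out-of-range
-- entry sitting only in rows A never reaches (e.g. in og[0]) while max_depth ≥ 2 — because
-- B's table pass reads every row; see the cited example.
def Pre_collect_node_patch (og : List (List Int)) (max_depth : Int) : Prop :=
  max_depth ≤ 1 ∨ ∀ ch ∈ og, ∀ c ∈ ch, -(og.length : Int) ≤ c ∧ c < (og.length : Int)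
instance (og : List (List Int)) (max_depth : Int) : Decidable (Pre_collect_node_patch og max_depth) := by
  unfold Pre_collect_node_patch; infer_instance

def pvWitness_collect_node_patch : List (List Int) × Int := ([[1], [0]], 3)

def Spec_collect_node_patch (og : List (List Int)) (max_depth : Int) (out : List (List (Int × Int × Int × Int × Int))) : Prop := out = collect_node_patch_alt og max_depth
instance (og : List (List Int)) (max_depth : Int) (out : List (List (Int × Int × Int × Int × Int))) : Decidable (Spec_collect_node_patch og max_depth out) := by unfold Spec_collect_node_patch; infer_instance

-- ===== CLAIM (what is proved, stated in full; the proofs are below) =====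
def Claim_equal_collect_node_patch : Prop := ∀ (og : List (List Int)) (max_depth : Int), Dom_collect_node_patch og max_depth → Pre_collect_node_patch og max_depth → Spec_collect_node_patch og max_depth (collect_node_patch og max_depth)

-- ===== LEMMAS AND PROOFS =====

-- pyGet? commutes with map (lengths agree, getElem? commutes)
theorem pvGet_map {α β : Type} (f : α → β) (xs : List α) (i : Int) :
    PySem.List.pyGet? (xs.map f) i = (PySem.List.pyGet? xs i).map f := by
  simp [PySem.List.pyGet?]

-- the layered table: pvTab k is B's table after k layer passes
def pvTab (og : List (List Int)) (md : Int) : Nat → List (List (Int × Int × Int × Int × Int))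
  | 0 => og.map (fun _ => [])
  | (k+1) => og.map (pvRowB md (md - 1 - (k : Int)) (pvTab og md k))

theorem pvFold_eq (og : List (List Int)) (md : Int) :
    ∀ (k : Nat), (k : Int) ≤ md - 1 →
    (PySem.List.pyRange ((k : Int) - 1) (-1) (-1)).foldl
      (fun T d => og.map (pvRowB md (d + 1) T)) (pvTab og md ((md - 1).toNat - k))
    = pvTab og md (md - 1).toNat := by
  intro k
  induction k with
  | zero =>
    intro _
    rw [PySem.List.pyRange_neg_one_eq_nil (by omega)]
    simp
  | succ k ih =>
    intro hk
    rw [show (((k + 1 : Nat) : Int) - 1 : Int) = (k : Int) by push_cast; ring,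
        PySem.List.pyRange_neg_one_cons (by omega), List.foldl_cons]
    have hm : (md - 1).toNat - (k + 1) + 1 = (md - 1).toNat - k := by omega
    have hstep : List.map (pvRowB md ((k : Int) + 1) (pvTab og md ((md - 1).toNat - (k + 1)))) og
        = pvTab og md ((md - 1).toNat - k) := by
      have hnd : md - 1 - (((md - 1).toNat - (k + 1) : Nat) : Int) = (k : Int) + 1 := by omega
      rw [← hm]
      show _ = List.map (pvRowB md (md - 1 - (((md - 1).toNat - (k + 1) : Nat) : Int)) _) og
      rw [hnd]
    rw [hstep]
    exact ih (by omega)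

-- main simulation lemma: the DFS emission from (node, depth) equals the table row
theorem pvRecA_eq (og : List (List Int)) (md : Int)
    (hP : ∀ ch ∈ og, ∀ c ∈ ch, -(og.length : Int) ≤ c ∧ c < (og.length : Int)) :
    ∀ (f : Nat) (d node : Int), 0 ≤ d → (md - d).toNat < f →
      -(og.length : Int) ≤ node → node < (og.length : Int) →
      pvRecA og md f node d
        = (PySem.List.pyGet? (pvTab og md (md - 1 - d).toNat) node).getD [] := by
  intro f
  induction f with
  | zero => intro d node _ hf; exact absurd hf (Nat.not_lt_zero _)
  | succ f ih =>
    intro d node h0 hf hlo hhi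
    obtain ⟨ch, hch⟩ : ∃ ch, PySem.List.pyGet? og node = some ch := by
      cases h : PySem.List.pyGet? og node with
      | none =>
        rw [PySem.List.pyGet?_eq_none_iff] at h
        exact absurd ⟨hlo, hhi⟩ h
      | some ch => exact ⟨ch, rfl⟩
    by_cases hd : d > md
    · rw [pvRecA, if_pos hd, show (md - 1 - d).toNat = 0 by omega,
          show pvTab og md 0 = og.map (fun _ => ([] : List (Int × Int × Int × Int × Int))) from rfl,
          pvGet_map, hch]
      rfl
    · by_cases hlt : d + 1 < md
      · have hk : (md - 1 - d).toNat = (md - 1 - (d + 1)).toNat + 1 := by omega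
        have hnd : md - 1 - (((md - 1 - (d + 1)).toNat : Nat) : Int) = d + 1 := by omega
        rw [pvRecA, if_neg hd, hk]
        show (PySem.List.enumerate ((PySem.List.pyGet? og node).getD []) 1).flatMap _ = _
        rw [pvTab, pvGet_map, hch, hnd]
        simp only [Option.map_some, Option.getD_some]
        unfold pvRowB
        apply List.flatMap_congr
        intro ic hic
        rw [if_pos hlt]
        have hmem : ic.2 ∈ ch := by
          rw [PySem.List.mem_enumerate_iff] at hic
          obtain ⟨k, hk', rfl⟩ := hic
          exact List.getElem_mem hk'
        obtain ⟨hclo, hchi⟩ := hP ch (PySem.List.mem_of_pyGet?_eq_some og hch) ic.2 hmem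
        rw [ih (d + 1) ic.2 (by omega) (by omega) hclo hchi]
      · rw [pvRecA, if_neg hd, show (md - 1 - d).toNat = 0 by omega,
            show pvTab og md 0 = og.map (fun _ => ([] : List (Int × Int × Int × Int × Int))) from rfl,
            pvGet_map, hch]
        simp [hlt]

-- ===== VERDICT (by name: the statement is the Claim_ definition above) =====
-- A's outer loop: the filter is vacuous (every patch list starts with the root tuple)
theorem pvFoldOuter {alpha : Type} (g : Int → alpha) (gs : Int → List alpha) (l : List Int) (acc : List (List alpha)) :
    l.foldl (fun res u =>
      let lis := g u :: gs u
      if lis.length > 0 then res ++ [lis] else res) acc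
    = acc ++ l.map (fun u => g u :: gs u) := by
  induction l generalizing acc with
  | nil => simp
  | cons x xs ih =>
    simp only [List.foldl_cons]
    rw [if_pos (by simp), ih]
    simp

-- B's fold over range(max_depth-2, -1, -1) computes the full layered table
theorem pvTable_eq (og : List (List Int)) (md : Int) :
    (PySem.List.pyRange (md - 2) (-1) (-1)).foldl
      (fun T d => og.map (pvRowB md (d + 1) T))
      (og.map (fun _ => ([] : List (Int × Int × Int × Int × Int))))
    = pvTab og md (md - 1).toNat := by
  by_cases h2 : 2 ≤ md
  · have h := pvFold_eq og md (md - 1).toNat (by omega)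
    rw [show (((md - 1).toNat : Int) - 1 : Int) = md - 2 by omega,
        Nat.sub_self] at h
    exact h
  · rw [PySem.List.pyRange_neg_one_eq_nil (by omega),
        show (md - 1).toNat = 0 by omega]
    simp [pvTab]

-- ===== VERDICT (by name: the statement is the Claim_ definition above) =====
theorem collect_node_patch_spec : Claim_equal_collect_node_patch := by
  intro og md _ hPre
  unfold Spec_collect_node_patch collect_node_patch collect_node_patch_alt
  rw [pvFoldOuter, List.nil_append]
  show _ = List.map (fun u => (u, 1, 1, 0, md) ::
      (PySem.List.pyGet?
        ((PySem.List.pyRange (md - 2) (-1) (-1)).foldl (fun T d => og.map (pvRowB md (d + 1) T))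
          (og.map (fun _ => ([] : List (Int × Int × Int × Int × Int))))) u).getD [])
    (PySem.List.pyRange 1 (og.length : Int) 1)
  rw [pvTable_eq]
  apply List.map_congr_left
  intro u hu
  rw [PySem.List.mem_pyRange_one] at hu
  obtain ⟨hu1, hun⟩ := hu
  congr 1
  rcases hPre with hmd | hP
  · -- max_depth ≤ 1: no patch extends below the root on either side
    have hz : (md - 1).toNat = 0 := by omega
    rw [hz, pvRecA,
        show pvTab og md 0 = og.map (fun _ => ([] : List (Int × Int × Int × Int × Int))) from rfl,
        pvGet_map]
    by_cases hneg : (0 : Int) > md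
    · rw [if_pos hneg]
      cases PySem.List.pyGet? og u <;> simp
    · rw [if_neg hneg]
      have hlt : ¬((0 : Int) + 1 < md) := by omega
      cases PySem.List.pyGet? og u <;> simp
      intros; omega
  · have h := pvRecA_eq og md hP (md.toNat + 1) 0 u le_rfl (by omega) (by omega) hun
    rw [show md - 1 - 0 = md - 1 by ring] at h
    exact h
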